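-- pv_equiv track=rewrite | github.com/liryan1/mystery | google_interview1.py | hamming_one
-- ===== SOURCE A (Python) =====
-- def hamming_one(strings: list[str]) -> bool:
--     lookup = {}
--     for s in strings:
--         for i in range(len(s)):
--             pref_suf = (s[:i], s[i+1:])
--             if pref_suf in lookup:
--                 if lookup[pref_suf] != s[i]:
--                     return True
--             else:
--                 lookup[pref_suf] = s[i]
--     return False
-- ===== SOURCE B (Python) =====
-- def hamming_one(strings: list[str]) -> bool:
--     n = len(strings)
--     for i in range(n):
--         for j in range(i + 1, n):
--             a, b = strings[i], strings[j]
--             if len(a) != len(b):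
--                 continue
--             diffs = 0
--             for x, y in zip(a, b):
--                 if x != y:
--                     diffs += 1
--                     if diffs > 1:
--                         break
--             if diffs == 1:
--                 return True
--     return False
-- ===== Notes on version B (the rewrite author's own statement) =====
-- stated objective: alternative
-- what changed: Replaced A's incrementally built (prefix, suffix) dictionary index by a direct pairwise loop over all string pairs that scans the two strings in parallel and stops at the second mismatch.
import Mathlib
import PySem

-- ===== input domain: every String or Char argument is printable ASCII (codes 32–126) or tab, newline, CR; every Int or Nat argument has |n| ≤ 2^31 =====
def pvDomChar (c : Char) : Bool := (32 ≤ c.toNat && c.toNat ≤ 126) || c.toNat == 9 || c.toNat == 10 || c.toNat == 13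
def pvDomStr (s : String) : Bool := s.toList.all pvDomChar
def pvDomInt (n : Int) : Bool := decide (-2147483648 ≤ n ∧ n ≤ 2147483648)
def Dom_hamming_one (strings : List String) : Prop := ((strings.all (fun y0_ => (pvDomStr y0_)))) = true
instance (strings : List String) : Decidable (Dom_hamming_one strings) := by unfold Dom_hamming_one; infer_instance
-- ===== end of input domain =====

-- B replaces A's (prefix, suffix) dictionary index by a direct pairwise position-by-position scan
-- stopping at the second mismatch (objective: alternative decomposition, no dictionary built).

-- ===== PORT A =====
-- inner loop of A: 'for i in range(len(s))'; returns none when A's 'return True' fires,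
-- some lookup (the updated dict) when the loop ends normally.
-- s[:i] / s[i+1:] are List.take/drop and s[i] is getD (exact: every i of range(len(s)) is in range).
def hammingInnerA (s : List Char) (idxs : List Nat)
    (lookup : PySem.Dict (List Char × List Char) Char) :
    Option (PySem.Dict (List Char × List Char) Char) :=
  match idxs with
  | [] => some lookup
  | i :: rest =>
    let pref_suf := (s.take i, s.drop (i + 1))
    match lookup.get? pref_suf with
    | some c => if c ≠ s.getD i ' ' then none else hammingInnerA s rest lookup
    | none => hammingInnerA s rest (lookup.insert pref_suf (s.getD i ' '))

def hammingOuterA : List (List Char) → PySem.Dict (List Char × List Char) Char → Bool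
  | [], _ => false
  | s :: rest, lookup =>
    match hammingInnerA s (List.range s.length) lookup with
    | none => true
    | some lookup' => hammingOuterA rest lookup'

def hamming_one (strings : List String) : Bool :=
  hammingOuterA (strings.map String.toList) PySem.Dict.empty

-- ===== PORT B =====
-- parallel scan counting differing positions, breaking as soon as the count exceeds 1
def hammingDiffs : List Char → List Char → Nat → Nat
  | x :: a, y :: b, d =>
    if x ≠ y then (if d + 1 > 1 then d + 1 else hammingDiffs a b (d + 1))
    else hammingDiffs a b d
  | _, _, d => d

def hammingPairOne (a b : List Char) : Bool :=
  a.length == b.length && hammingDiffs a b 0 == 1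

def hammingOuterB : List (List Char) → Bool
  | [] => false
  | s :: rest => rest.any (hammingPairOne s) || hammingOuterB rest

def hamming_one_alt (strings : List String) : Bool :=
  hammingOuterB (strings.map String.toList)

-- ===== PRECONDITION & SPEC =====
def Spec_hamming_one (strings : List String) (out : Bool) : Prop := out = hamming_one_alt strings
instance (strings : List String) (out : Bool) : Decidable (Spec_hamming_one strings out) := by unfold Spec_hamming_one; infer_instance

-- ===== CLAIM (what is proved, stated in full; the proofs are below) =====
def Claim_equal_hamming_one : Prop := ∀ (strings : List String), Dom_hamming_one strings → Spec_hamming_one strings (hamming_one strings)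

-- ===== LEMMAS AND PROOFS =====

-- Hamming distance exactly one, as a decomposition
def HD1 (a b : List Char) : Prop :=
  ∃ p c c' q, c ≠ c' ∧ a = p ++ c :: q ∧ b = p ++ c' :: q

-- Hamming distance exactly one, at a position ≥ i
def HD1ge (a b : List Char) (i : Nat) : Prop :=
  ∃ p c c' q, i ≤ p.length ∧ c ≠ c' ∧ a = p ++ c :: q ∧ b = p ++ c' :: q

-- number of mismatching positions (over the zipped common part)
def mis : List Char → List Char → Nat
  | x :: a, y :: b => (if x = y then 0 else 1) + mis a b
  | _, _ => 0

def InKey (done : List (List Char)) (p q : List Char) (c : Char) : Prop :=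
  ∃ t ∈ done, t = p ++ c :: q

-- no pair (in any order) of 'done' is at distance one
def ND (done : List (List Char)) : Prop := ∀ s ∈ done, ∀ t ∈ done, ¬ HD1 s t

-- lookup state after processing all of 'done' and positions < i of s
def GoodP (done : List (List Char)) (s : List Char) (i : Nat)
    (lk : PySem.Dict (List Char × List Char) Char) : Prop :=
  ∀ p q c, lk.get? (p, q) = some c ↔
    (InKey done p q c ∨ (p.length < i ∧ s = p ++ c :: q ∧ ¬ ∃ c', InKey done p q c'))

def Good (done : List (List Char)) (lk : PySem.Dict (List Char × List Char) Char) : Prop :=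
  ∀ p q c, lk.get? (p, q) = some c ↔ InKey done p q c

-- the common specification: some ordered pair of the list is at Hamming distance one
def ExP : List (List Char) → Prop
  | [] => False
  | s :: rest => (∃ t ∈ rest, HD1 s t) ∨ ExP rest

theorem decomp_eq {s p p' q q' : List Char} {c c' : Char}
    (h : s = p ++ c :: q) (h' : s = p' ++ c' :: q') (hl : p.length = p'.length) :
    p = p' ∧ c = c' ∧ q = q' := by
  have hh := h.symm.trans h'
  rcases List.append_inj hh hl with ⟨hp, hcq⟩
  refine ⟨hp, ?_, ?_⟩
  · exact (List.cons.injEq _ _ _ _ ▸ hcq).1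
  · exact (List.cons.injEq _ _ _ _ ▸ hcq).2

theorem hd1_irrefl (s : List Char) : ¬ HD1 s s := by
  rintro ⟨p, c, c', q, hne, h1, h2⟩
  exact hne (decomp_eq h1 h2 rfl).2.1

theorem hd1_symm {a b : List Char} (h : HD1 a b) : HD1 b a := by
  rcases h with ⟨p, c, c', q, hne, h1, h2⟩
  exact ⟨p, c', c, q, fun e => hne e.symm, h2, h1⟩

theorem hd1_length {a b : List Char} (h : HD1 a b) : a.length = b.length := by
  rcases h with ⟨p, c, c', q, _, h1, h2⟩
  subst h1; subst h2; simp

theorem inkey_unique {done : List (List Char)} {p q : List Char} {c c' : Char} (hnd : ND done)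
    (h : InKey done p q c) (h' : InKey done p q c') : c = c' := by
  rcases h with ⟨t, ht, rfl⟩
  rcases h' with ⟨t', ht', rfl⟩
  by_contra hne
  exact hnd _ ht _ ht' ⟨p, c, c', q, hne, rfl, rfl⟩

theorem hd1ge_zero {a b : List Char} : HD1ge a b 0 ↔ HD1 a b := by
  constructor
  · rintro ⟨p, c, c', q, _, hne, h1, h2⟩; exact ⟨p, c, c', q, hne, h1, h2⟩
  · rintro ⟨p, c, c', q, hne, h1, h2⟩; exact ⟨p, c, c', q, Nat.zero_le _, hne, h1, h2⟩

-- ===== B side =====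

theorem diffs_min (a : List Char) : ∀ b d, d ≤ 1 →
    hammingDiffs a b d = min 2 (d + mis a b) := by
  induction a with
  | nil => intro b d hd; cases b <;> (simp [hammingDiffs, mis]; try omega)
  | cons x a ih =>
    intro b d hd
    cases b with
    | nil => simp [hammingDiffs, mis]; try omega
    | cons y b =>
      by_cases hxy : x = y
      · simp [hammingDiffs, mis, hxy, ih b d hd]
      · rcases Nat.lt_or_ge d 1 with h1 | h1
        · have hd0 : d = 0 := by omega
          subst hd0
          simp [hammingDiffs, mis, hxy, ih b 1 (le_refl 1)]
          try omega
        · have hd1 : d = 1 := by omega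
          subst hd1
          simp [hammingDiffs, mis, hxy]
          try omega

theorem mis_zero (a : List Char) : ∀ b, a.length = b.length → (mis a b = 0 ↔ a = b) := by
  induction a with
  | nil => intro b hb; cases b <;> simp [mis] at hb ⊢
  | cons x a ih =>
    intro b hb
    cases b with
    | nil => simp at hb
    | cons y b =>
      simp at hb
      by_cases hxy : x = y
      · simp [mis, hxy, ih b hb]
      · simp [mis, hxy]

theorem mis_one (a : List Char) : ∀ b, a.length = b.length → (mis a b = 1 ↔ HD1 a b) := by
  induction a with
  | nil =>
    intro b hb
    cases b with
    | nil =>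
      simp only [mis]
      constructor
      · intro h; omega
      · rintro ⟨p, c, c', q, _, h1, _⟩; cases p <;> simp at h1
    | cons y b => simp at hb
  | cons x a ih =>
    intro b hb
    cases b with
    | nil => simp at hb
    | cons y b =>
      simp at hb
      by_cases hxy : x = y
      · subst hxy
        rw [show mis (x :: a) (x :: b) = mis a b by simp [mis]]
        rw [ih b hb]
        constructor
        · rintro ⟨p, c, c', q, hne, h1, h2⟩
          exact ⟨x :: p, c, c', q, hne, by simp [h1], by simp [h2]⟩
        · rintro ⟨p, c, c', q, hne, h1, h2⟩
          cases p with
          | nil =>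
            simp at h1 h2
            exact absurd (h1.1.symm.trans h2.1) hne
          | cons z p =>
            simp at h1 h2
            exact ⟨p, c, c', q, hne, h1.2, h2.2⟩
      · rw [show mis (x :: a) (y :: b) = 1 + mis a b by simp [mis, hxy]]
        constructor
        · intro h
          have h0 : mis a b = 0 := by omega
          have hab : a = b := (mis_zero a b hb).mp h0
          exact ⟨[], x, y, b, hxy, by simp [hab], by simp⟩
        · rintro ⟨p, c, c', q, hne, h1, h2⟩
          cases p with
          | nil =>
            simp at h1 h2
            have hab : a = b := h1.2.trans h2.2.symm
            have := (mis_zero a b hb).mpr hab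
            omega
          | cons z p =>
            simp at h1 h2
            exact absurd (h1.1.trans h2.1.symm) hxy

theorem pairOne_iff {a b : List Char} : hammingPairOne a b = true ↔ HD1 a b := by
  unfold hammingPairOne
  rw [Bool.and_eq_true, beq_iff_eq, beq_iff_eq, diffs_min a b 0 (by omega)]
  constructor
  · rintro ⟨hl, hm⟩
    have : mis a b = 1 := by omega
    exact (mis_one a b hl).mp this
  · intro h
    have hl := hd1_length h
    have : mis a b = 1 := (mis_one a b hl).mpr h
    exact ⟨hl, by omega⟩

theorem outerB_spec (l : List (List Char)) : hammingOuterB l = true ↔ ExP l := by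
  induction l with
  | nil => simp [hammingOuterB, ExP]
  | cons s rest ih =>
    simp only [hammingOuterB, Bool.or_eq_true, List.any_eq_true, ih, ExP]
    constructor
    · rintro (⟨t, ht, hp⟩ | h)
      · exact Or.inl ⟨t, ht, pairOne_iff.mp hp⟩
      · exact Or.inr h
    · rintro (⟨t, ht, hp⟩ | h)
      · exact Or.inl ⟨t, ht, pairOne_iff.mpr hp⟩
      · exact Or.inr h

-- ===== A side =====

theorem innerA_cons (s : List Char) (i : Nat) (rest : List Nat)
    (lk : PySem.Dict (List Char × List Char) Char) :
    hammingInnerA s (i :: rest) lk =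
      (match lk.get? (s.take i, s.drop (i + 1)) with
       | some c => if c ≠ s.getD i ' ' then none else hammingInnerA s rest lk
       | none => hammingInnerA s rest (lk.insert (s.take i, s.drop (i + 1)) (s.getD i ' '))) := rfl

theorem innerA_spec (s : List Char) (done : List (List Char)) (hnd : ND done) :
    ∀ (k i : Nat) (lk : PySem.Dict (List Char × List Char) Char), i + k = s.length →
      GoodP done s i lk →
      (∀ (p q : List Char) (c c' : Char), p.length < i → s = p ++ c :: q → InKey done p q c' → c = c') →
      ((hammingInnerA s (List.range' i k) lk = none ↔ ∃ t ∈ done, HD1ge s t i) ∧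
       (∀ lk', hammingInnerA s (List.range' i k) lk = some lk' → GoodP done s s.length lk')) := by
  intro k
  induction k with
  | zero =>
    intro i lk hik hg _
    have hi : i = s.length := by omega
    subst hi
    constructor
    · simp only [List.range', hammingInnerA]
      constructor
      · intro h; simp at h
      · rintro ⟨t, ht, p, c, c', q, hp, _, h1, _⟩
        have := congrArg List.length h1
        simp at this
        omega
    · intro lk' h
      simp only [List.range', hammingInnerA] at h
      injection h with h
      subst h
      exact hg
  | succ k ih =>
    intro i lk hik hg hlt
    have hi : i < s.length := by omega
    have hdecomp : s = s.take i ++ s.getD i ' ' :: s.drop (i + 1) := by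
      rw [List.getD_eq_getElem s ' ' hi]
      conv_lhs => rw [← List.take_append_drop i s]
      rw [List.drop_eq_getElem_cons hi]
    have htl : (s.take i).length = i := by rw [List.length_take]; omega
    have huniq : ∀ (p q : List Char) (c : Char), s = p ++ c :: q → p.length = i →
        p = s.take i ∧ c = s.getD i ' ' ∧ q = s.drop (i + 1) := by
      intro p q c h hl
      exact decomp_eq h hdecomp (by omega)
    rw [List.range'_succ, innerA_cons]
    cases hlook : lk.get? (s.take i, s.drop (i + 1)) with
    | some c =>
      dsimp only
      have hInK : InKey done (s.take i) (s.drop (i + 1)) c := by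
        rcases (hg _ _ c).mp hlook with h | ⟨hlt', _, _⟩
        · exact h
        · omega
      by_cases hcc : c = s.getD i ' '
      · rw [if_neg (by simp [hcc])]
        have hg' : GoodP done s (i + 1) lk := by
          intro p q c₀
          rw [hg p q c₀]
          constructor
          · rintro (h | ⟨hpl, hseq, hnex⟩)
            · exact Or.inl h
            · exact Or.inr ⟨by omega, hseq, hnex⟩
          · rintro (h | ⟨hpl, hseq, hnex⟩)
            · exact Or.inl h
            · rcases Nat.lt_or_ge p.length i with hlt2 | hge
              · exact Or.inr ⟨hlt2, hseq, hnex⟩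
              · have hpl' : p.length = i := by omega
                obtain ⟨hp, hc, hq⟩ := huniq p q c₀ hseq hpl'
                subst hp; subst hq
                exact absurd ⟨c, hInK⟩ hnex
        have hlt' : ∀ (p q : List Char) (c₀ c' : Char), p.length < i + 1 → s = p ++ c₀ :: q →
            InKey done p q c' → c₀ = c' := by
          intro p q c₀ c' hpl hseq hik'
          rcases Nat.lt_or_ge p.length i with hlt2 | hge
          · exact hlt p q c₀ c' hlt2 hseq hik'
          · have hpl' : p.length = i := by omega
            obtain ⟨hp, hc, hq⟩ := huniq p q c₀ hseq hpl'
            subst hp; subst hq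
            rw [hc, ← hcc]
            exact inkey_unique hnd hInK hik'
        have IH := ih (i + 1) lk (by omega) hg' hlt'
        refine ⟨?_, IH.2⟩
        rw [IH.1]
        constructor
        · rintro ⟨t, ht, p, c₀, c', q, hp, hne, h1, h2⟩
          exact ⟨t, ht, p, c₀, c', q, by omega, hne, h1, h2⟩
        · rintro ⟨t, ht, p, c₀, c', q, hp, hne, h1, h2⟩
          rcases Nat.lt_or_ge p.length (i + 1) with hlt2 | hge
          · have hpl' : p.length = i := by omega
            obtain ⟨hpp, hcp, hqp⟩ := huniq p q c₀ h1 hpl'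
            subst hpp; subst hqp
            have : c = c' := inkey_unique hnd hInK ⟨t, ht, h2⟩
            rw [hcp, ← hcc] at hne
            exact absurd this hne
          · exact ⟨t, ht, p, c₀, c', q, hge, hne, h1, h2⟩
      · rw [if_pos hcc]
        constructor
        · constructor
          · intro _
            rcases hInK with ⟨t, ht, hteq⟩
            exact ⟨t, ht, s.take i, s.getD i ' ', c, s.drop (i + 1), htl.ge,
              fun e => hcc e.symm, hdecomp, hteq⟩
          · intro _; rfl
        · intro lk' h; simp at h
    | none =>
      dsimp only
      have hnoKey : ∀ c', ¬ InKey done (s.take i) (s.drop (i + 1)) c' := by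
        intro c' hc'
        have := (hg _ _ c').mpr (Or.inl hc')
        rw [hlook] at this
        exact absurd this (by simp)
      have hg' : GoodP done s (i + 1) (lk.insert (s.take i, s.drop (i + 1)) (s.getD i ' ')) := by
        intro p q c₀
        rw [PySem.Dict.get?_insert]
        by_cases hk : (p, q) = (s.take i, s.drop (i + 1))
        · rw [if_pos hk]
          obtain ⟨hp, hq⟩ := Prod.mk.injEq .. ▸ hk
          subst hp; subst hq
          constructor
          · intro h
            injection h with h
            refine Or.inr ⟨by omega, ?_, fun ⟨c', h'⟩ => hnoKey c' h'⟩
            rw [← h]; exact hdecomp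
          · rintro (h | ⟨_, hseq, _⟩)
            · exact absurd h (hnoKey c₀)
            · have := (decomp_eq hseq hdecomp (by omega)).2.1
              rw [this]
        · rw [if_neg hk]
          rw [hg p q c₀]
          constructor
          · rintro (h | ⟨hpl, hseq, hnex⟩)
            · exact Or.inl h
            · exact Or.inr ⟨by omega, hseq, hnex⟩
          · rintro (h | ⟨hpl, hseq, hnex⟩)
            · exact Or.inl h
            · rcases Nat.lt_or_ge p.length i with hlt2 | hge
              · exact Or.inr ⟨hlt2, hseq, hnex⟩
              · have hpl' : p.length = i := by omega
                obtain ⟨hpp, hcp, hqp⟩ := huniq p q c₀ hseq hpl'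
                exact absurd (Prod.ext hpp hqp) hk
      have hlt' : ∀ (p q : List Char) (c₀ c' : Char), p.length < i + 1 → s = p ++ c₀ :: q →
          InKey done p q c' → c₀ = c' := by
        intro p q c₀ c' hpl hseq hik'
        rcases Nat.lt_or_ge p.length i with hlt2 | hge
        · exact hlt p q c₀ c' hlt2 hseq hik'
        · have hpl' : p.length = i := by omega
          obtain ⟨hpp, hcp, hqp⟩ := huniq p q c₀ hseq hpl'
          subst hpp; subst hqp
          exact absurd hik' (hnoKey c')
      have IH := ih (i + 1) _ (by omega) hg' hlt'
      refine ⟨?_, IH.2⟩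
      rw [IH.1]
      constructor
      · rintro ⟨t, ht, p, c₀, c', q, hp, hne, h1, h2⟩
        exact ⟨t, ht, p, c₀, c', q, by omega, hne, h1, h2⟩
      · rintro ⟨t, ht, p, c₀, c', q, hp, hne, h1, h2⟩
        rcases Nat.lt_or_ge p.length (i + 1) with hlt2 | hge
        · have hpl' : p.length = i := by omega
          obtain ⟨hpp, hcp, hqp⟩ := huniq p q c₀ h1 hpl'
          subst hpp; subst hqp
          exact absurd ⟨t, ht, h2⟩ (hnoKey c')
        · exact ⟨t, ht, p, c₀, c', q, hge, hne, h1, h2⟩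

theorem goodp_full {done : List (List Char)} {s : List Char}
    {lk : PySem.Dict (List Char × List Char) Char} (_hnd : ND done)
    (hno : ¬ ∃ t ∈ done, HD1 s t) (hg : GoodP done s s.length lk) : Good (done ++ [s]) lk := by
  intro p q c
  rw [hg p q c]
  constructor
  · rintro (⟨t, ht, rfl⟩ | ⟨_, hs, _⟩)
    · exact ⟨p ++ c :: q, by simp [ht], rfl⟩
    · exact ⟨s, by simp, hs⟩
  · rintro ⟨t, ht, htEq⟩
    rcases List.mem_append.mp ht with h1 | h1
    · exact Or.inl ⟨t, h1, htEq⟩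
    · have hts : t = s := by simpa using h1
      subst hts
      by_cases hex : ∃ c', InKey done p q c'
      · rcases hex with ⟨c', hc'⟩
        have hcc : c' = c := by
          by_contra hne
          rcases hc' with ⟨u, hu, rfl⟩
          exact hno ⟨p ++ c' :: q, hu, ⟨p, c, c', q, fun e => hne e.symm, htEq, rfl⟩⟩
        subst hcc
        exact Or.inl hc'
      · refine Or.inr ⟨?_, htEq, hex⟩
        have := congrArg List.length htEq
        simp at this
        omega

theorem nd_append {done : List (List Char)} {s : List Char} (hnd : ND done)
    (hno : ¬ ∃ t ∈ done, HD1 s t) : ND (done ++ [s]) := by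
  intro a ha b hb
  simp at ha hb
  rcases ha with ha | rfl <;> rcases hb with hb | rfl
  · exact hnd _ ha _ hb
  · intro h; exact hno ⟨a, ha, hd1_symm h⟩
  · intro h; exact hno ⟨b, hb, h⟩
  · exact hd1_irrefl _

theorem outerA_spec : ∀ (l done : List (List Char)) (lk : PySem.Dict (List Char × List Char) Char),
    ND done → Good done lk →
    (hammingOuterA l lk = true ↔ ((∃ u ∈ l, ∃ t ∈ done, HD1 u t) ∨ ExP l)) := by
  intro l
  induction l with
  | nil => intro done lk _ _; simp [hammingOuterA, ExP]
  | cons s rest ih =>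
    intro done lk hnd hg
    have hg0 : GoodP done s 0 lk := by
      intro p q c; rw [hg p q c]; simp
    have hin := innerA_spec s done hnd s.length 0 lk (by omega) hg0 (by intro p q c c' h; omega)
    rw [show List.range' 0 s.length = List.range s.length from (List.range_eq_range').symm] at hin
    show (match hammingInnerA s (List.range s.length) lk with
          | none => true
          | some lookup' => hammingOuterA rest lookup') = true ↔ _
    cases hres : hammingInnerA s (List.range s.length) lk with
    | none =>
      simp only [true_iff]
      rcases hin.1.mp hres with ⟨t, ht, hge⟩
      exact Or.inl ⟨s, by simp, t, ht, hd1ge_zero.mp hge⟩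
    | some lk' =>
      have hno : ¬ ∃ t ∈ done, HD1 s t := by
        rintro ⟨t, ht, h⟩
        have hnone := hin.1.mpr ⟨t, ht, hd1ge_zero.mpr h⟩
        rw [hres] at hnone
        exact absurd hnone (by simp)
      have hgf := hin.2 lk' hres
      have hgood' := goodp_full hnd hno hgf
      have hnd' := nd_append hnd hno
      rw [ih (done ++ [s]) lk' hnd' hgood']
      simp only [ExP]
      constructor
      · rintro (⟨u, hu, t, ht, h⟩ | h)
        · rcases List.mem_append.mp ht with h1 | h1
          · exact Or.inl ⟨u, by simp [hu], t, h1, h⟩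
          · have : t = s := by simpa using h1
            subst this
            exact Or.inr (Or.inl ⟨u, hu, hd1_symm h⟩)
        · exact Or.inr (Or.inr h)
      · rintro (⟨u, hu, t, ht, h⟩ | (⟨t, ht, hst⟩ | h))
        · rcases (by simpa using hu : u = s ∨ u ∈ rest) with rfl | hu'
          · exact absurd ⟨t, ht, h⟩ hno
          · exact Or.inl ⟨u, hu', t, by simp [ht], h⟩
        · exact Or.inl ⟨t, ht, s, by simp, hd1_symm hst⟩
        · exact Or.inr h

-- ===== VERDICT (by name: the statement is the Claim_ definition above) =====
theorem hamming_one_spec : Claim_equal_hamming_one := by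
  intro strings _
  unfold Spec_hamming_one hamming_one hamming_one_alt
  have hA := outerA_spec (strings.map String.toList) [] PySem.Dict.empty
    (by intro u hu; simp at hu)
    (by intro p q c; simp [PySem.Dict.get?_empty, InKey])
  have hB := outerB_spec (strings.map String.toList)
  apply Bool.coe_iff_coe.mp
  rw [hA, hB]
  simp
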